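-- pv_equiv track=rewrite | github.com/opendatahub-io/odh-test-gen | scripts/utils/tc_parser.py | _extract_bullet_list
-- ===== SOURCE A (Python) =====
-- from typing import Dict, List
--
-- def _extract_bullet_list(section_content: str) -> List[str]:
--     """
--     Extract items from markdown bullet list.
--
--     Handles:
--     - Lines starting with '- ' or '* '
--     - Multi-line items (continuation lines without bullets)
--     - Empty lines between items
--
--     Args:
--         section_content: Section text containing bullet list
--
--     Returns:
--         List of items (without bullet markers, multi-line items joined)
--     """
--     if not section_content.strip():
--         return []
--
--     items = []
--     current_item = None
--
--     for line in section_content.split('\n'):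
--         stripped = line.strip()
--
--         # Empty line - end current item
--         if not stripped:
--             if current_item:
--                 items.append(current_item.strip())
--                 current_item = None
--             continue
--
--         # New bullet item
--         if stripped.startswith('- ') or stripped.startswith('* '):
--             # Save previous item
--             if current_item:
--                 items.append(current_item.strip())
--             # Start new item (remove bullet marker)
--             current_item = stripped[2:]
--
--         # Continuation line (no bullet, part of current item)
--         elif current_item is not None:
--             current_item += ' ' + stripped
--
--         # Text before first bullet (ignore - shouldn't happen in well-formed TC)
--         else:
--             pass
--
--     # Save last item
--     if current_item:
--         items.append(current_item.strip())
--
--     return items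
-- ===== SOURCE B (Python) =====
-- from typing import List
--
--
-- def _extract_bullet_list(section_content: str) -> List[str]:
--     """Two-pass variant: group lines into blank-separated blocks, then parse each block."""
--     if not section_content.strip():
--         return []
--
--     # Pass 1: maximal runs of non-blank lines (stored stripped); blank lines separate blocks.
--     blocks = []
--     block = []
--     for line in section_content.split('\n'):
--         stripped = line.strip()
--         if stripped:
--             block.append(stripped)
--         elif block:
--             blocks.append(block)
--             block = []
--     if block:
--         blocks.append(block)
--
--     # Pass 2: parse bullets inside each block.
--     items = []
--     for block in blocks:
--         item = None
--         for stripped in block: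
--             if stripped.startswith('- ') or stripped.startswith('* '):
--                 if item:
--                     items.append(item.strip())
--                 item = stripped[2:]
--             elif item is not None:
--                 item = item + ' ' + stripped
--         if item:
--             items.append(item.strip())
--     return items
-- ===== Notes on version B (the rewrite author's own statement) =====
-- stated objective: alternative
-- what changed: A's single flat loop with in-loop blank-line flushing is replaced by a two-pass decomposition: pass 1 groups the stripped lines into blank-separated blocks, pass 2 parses the bullets of each block with a per-block inner loop and end-of-block flush.
import Mathlib
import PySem

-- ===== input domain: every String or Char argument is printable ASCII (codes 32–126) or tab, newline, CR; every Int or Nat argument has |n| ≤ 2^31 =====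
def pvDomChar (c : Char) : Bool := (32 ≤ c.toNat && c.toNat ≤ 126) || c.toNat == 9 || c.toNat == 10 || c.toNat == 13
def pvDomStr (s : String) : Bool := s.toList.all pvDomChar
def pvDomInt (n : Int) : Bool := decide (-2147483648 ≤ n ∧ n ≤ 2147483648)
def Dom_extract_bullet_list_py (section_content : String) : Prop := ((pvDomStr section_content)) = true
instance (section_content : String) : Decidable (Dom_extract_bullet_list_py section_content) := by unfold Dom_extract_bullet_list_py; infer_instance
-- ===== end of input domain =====

-- B replaces A's single flat loop by a different decomposition: one pass that groups the
-- stripped lines into blank-separated blocks, then a block-wise bullet parse (same output).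

-- ===== PORT A =====
-- one iteration of A's flat 'for line in section_content.split('\n')' loop over (items, current_item)
def pvStepA (st : List String × Option String) (line : String) : List String × Option String :=
  let stripped := PySem.Str.strip line
  if stripped = "" then
    -- empty line: 'if current_item: items.append(current_item.strip()); current_item = None'
    match st.2 with
    | some c => if c = "" then st else (st.1 ++ [PySem.Str.strip c], none)
    | none => st
  else if PySem.Str.startswith stripped "- " || PySem.Str.startswith stripped "* " then
    -- new bullet: flush previous item, start a new one from stripped[2:]
    ((match st.2 with
      | some c => if c = "" then st.1 else st.1 ++ [PySem.Str.strip c]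
      | none => st.1),
     some (PySem.Str.slice stripped (some 2) none))
  else
    -- continuation line (or ignored text before the first bullet)
    match st.2 with
    | some c => (st.1, some (c ++ " " ++ stripped))
    | none => st

def extract_bullet_list_py (section_content : String) : List String :=
  if PySem.Str.strip section_content = "" then []
  else
    let st := ((PySem.Str.split? section_content "\n").getD []).foldl pvStepA ([], none)
    -- final 'if current_item: items.append(current_item.strip())'
    match st.2 with
    | some c => if c = "" then st.1 else st.1 ++ [PySem.Str.strip c]
    | none => st.1

-- ===== PORT B =====
-- 'if item: items.append(item.strip())'
def pvFlush (items : List String) (item : Option String) : List String :=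
  match item with
  | some c => if c = "" then items else items ++ [PySem.Str.strip c]
  | none => items

-- pass 1 step: collect stripped non-blank lines into the current block; a blank line closes it
def pvGroupStep (st : List (List String) × List String) (line : String) : List (List String) × List String :=
  let stripped := PySem.Str.strip line
  if stripped ≠ "" then (st.1, st.2 ++ [stripped])
  else if st.2 ≠ [] then (st.1 ++ [st.2], [])
  else st

-- pass 2 inner step: bullet parsing of one (already stripped, non-blank) line of a block
def pvInnerStep (st : List String × Option String) (stripped : String) : List String × Option String :=
  if PySem.Str.startswith stripped "- " || PySem.Str.startswith stripped "* " then
    (pvFlush st.1 st.2, some (PySem.Str.slice stripped (some 2) none))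
  else
    match st.2 with
    | some c => (st.1, some (c ++ " " ++ stripped))
    | none => st

-- pass 2 outer step: parse one block, flushing the last item at the block's end
def pvBlockStep (items : List String) (block : List String) : List String :=
  let r := block.foldl pvInnerStep (items, none)
  pvFlush r.1 r.2

def extract_bullet_list_py_alt (section_content : String) : List String :=
  if PySem.Str.strip section_content = "" then []
  else
    let p := ((PySem.Str.split? section_content "\n").getD []).foldl pvGroupStep ([], [])
    let blocks := if p.2 ≠ [] then p.1 ++ [p.2] else p.1
    blocks.foldl pvBlockStep []

-- ===== PRECONDITION & SPEC =====
def Spec_extract_bullet_list_py (section_content : String) (out : List String) : Prop := out = extract_bullet_list_py_alt section_content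
instance (section_content : String) (out : List String) : Decidable (Spec_extract_bullet_list_py section_content out) := by unfold Spec_extract_bullet_list_py; infer_instance

-- ===== CLAIM (what is proved, stated in full; the proofs are below) =====
def Claim_equal_extract_bullet_list_py : Prop := ∀ (section_content : String), Dom_extract_bullet_list_py section_content → Spec_extract_bullet_list_py section_content (extract_bullet_list_py section_content)

-- ===== LEMMAS AND PROOFS =====

-- a line as pass 1 stores it: non-blank after stripping, and (being stripped) it cannot be
-- a bare bullet marker '- ' / '* ', so starting an item from stripped[2:] never yields ""
def pvGood (s : String) : Prop := s ≠ "" ∧ s ≠ "- " ∧ s ≠ "* "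

theorem pv_dropWhile_head_false (p : Char → Bool) (l bs : List Char) (a : Char)
    (h : List.dropWhile p l = a :: bs) : p a = false := by
  have h2 : List.dropWhile p l ≠ [] := by rw [h]; simp
  have := List.head_dropWhile_not p h2
  simp only [h, List.head_cons] at this
  exact this

-- the result of str.strip never ends in whitespace, so it is never literally "- " or "* "
theorem pv_strip_ne_marker (l : String) (m : String) (hm : m = "- " ∨ m = "* ") :
    PySem.Str.strip l ≠ m := by
  intro h
  have ht : (PySem.Str.strip l).toList = m.toList := by rw [h]
  rw [PySem.Str.toList_strip] at ht
  unfold PySem.Chars.strip PySem.Chars.rstrip at ht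
  have hrev : List.dropWhile PySem.Chars.isspace (PySem.Chars.lstrip l.toList).reverse
      = m.toList.reverse := by
    have := congrArg List.reverse ht
    simpa using this
  rcases hm with hm | hm <;> subst hm
  · have := pv_dropWhile_head_false _ _ _ ' ' (by simpa using hrev)
    simpa [PySem.Chars.isspace] using this
  · have := pv_dropWhile_head_false _ _ _ ' ' (by simpa using hrev)
    simpa [PySem.Chars.isspace] using this

theorem pv_good_strip (l : String) (h : PySem.Str.strip l ≠ "") : pvGood (PySem.Str.strip l) :=
  ⟨h, pv_strip_ne_marker l _ (Or.inl rfl), pv_strip_ne_marker l _ (Or.inr rfl)⟩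

-- stripped[2:] of a good line that starts with '- ' or '* ' is non-empty
theorem pv_slice_ne_empty (s : String) (hg : pvGood s)
    (hb : (PySem.Str.startswith s "- " || PySem.Str.startswith s "* ") = true) :
    PySem.Str.slice s (some 2) none ≠ "" := by
  intro h
  have ht : (PySem.Str.slice s (some 2) none).toList = [] := by rw [h]; rfl
  rw [PySem.Str.toList_slice, PySem.Chars.slice_eq_listSlice,
      PySem.List.slice_from _ (by norm_num)] at ht
  have hlen2 : s.toList.length ≤ 2 := by
    have := List.drop_eq_nil_iff.mp ht
    omega
  rcases Bool.or_eq_true_iff.mp hb with hp | hp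
  · have hpre : ("- ".toList) <+: s.toList := (PySem.Chars.startswith_iff _ _).mp (by simpa using hp)
    have heq : ("- ".toList) = s.toList := hpre.eq_of_length (by
      have hL := hpre.length_le
      have h2 : ("- ".toList).length = 2 := by decide
      omega)
    exact hg.2.1 (String.toList_inj.mp heq.symm)
  · have hpre : ("* ".toList) <+: s.toList := (PySem.Chars.startswith_iff _ _).mp (by simpa using hp)
    have heq : ("* ".toList) = s.toList := hpre.eq_of_length (by
      have hL := hpre.length_le
      have h2 : ("* ".toList).length = 2 := by decide
      omega)
    exact hg.2.2 (String.toList_inj.mp heq.symm)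

theorem pv_append_ne_empty (c s : String) : c ++ " " ++ s ≠ "" := by
  intro h
  have : (c ++ " " ++ s).toList = [] := by rw [h]; rfl
  simp [String.toList_append] at this

-- the running item inside a block of good lines is never the empty string
theorem pv_inner_snd_ne (block : List String) :
    ∀ st : List String × Option String, (∀ s ∈ block, pvGood s) → st.2 ≠ some "" →
    (block.foldl pvInnerStep st).2 ≠ some "" := by
  induction block with
  | nil => intro st _ h; simpa using h
  | cons s rest ih =>
    intro st hg h
    have hgs : pvGood s := hg s (by simp)
    have hrest : ∀ t ∈ rest, pvGood t := fun t ht => hg t (by simp [ht])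
    simp only [List.foldl_cons]
    apply ih _ hrest
    unfold pvInnerStep
    split
    · next hb =>
      simp only [ne_eq, Option.some.injEq]
      exact fun he => pv_slice_ne_empty s hgs hb he
    · match hst : st.2 with
      | some c =>
        simp only [hst, ne_eq, Option.some.injEq]
        exact fun he => pv_append_ne_empty c s he
      | none => simpa [hst] using h

-- a non-blank line acts on A's state exactly like B's inner bullet step on the stripped line
theorem pv_stepA_nonblank (st : List String × Option String) (line : String)
    (h : PySem.Str.strip line ≠ "") : pvStepA st line = pvInnerStep st (PySem.Str.strip line) := by
  unfold pvStepA pvInnerStep pvFlush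
  simp only [h, if_false, reduceIte]

-- a blank line flushes A's state (given the running item is never literally "")
theorem pv_stepA_blank (st : List String × Option String) (line : String)
    (h : PySem.Str.strip line = "") (hne : st.2 ≠ some "") :
    pvStepA st line = (pvFlush st.1 st.2, none) := by
  unfold pvStepA pvFlush
  simp only [h, reduceIte]
  match hst : st.2 with
  | none => simp [← hst]
  | some c =>
    have hc : c ≠ "" := fun he => hne (by rw [hst, he])
    simp [hc]

-- pass 1 only ever appends to the list of finished blocks
theorem pv_group_prefix (lines : List String) :
    ∀ (bs0 : List (List String)) (b : List String),
    lines.foldl pvGroupStep (bs0, b)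
      = (bs0 ++ (lines.foldl pvGroupStep ([], b)).1, (lines.foldl pvGroupStep ([], b)).2) := by
  induction lines with
  | nil => intro bs0 b; simp
  | cons l rest ih =>
    intro bs0 b
    simp only [List.foldl_cons]
    by_cases h : PySem.Str.strip l = ""
    · by_cases hb : b = []
      · have e1 : pvGroupStep (bs0, b) l = (bs0, b) := by simp [pvGroupStep, h, hb]
        have e2 : pvGroupStep ([], b) l = ([], b) := by simp [pvGroupStep, h, hb]
        rw [e1, e2, ih bs0 b]
      · have e1 : pvGroupStep (bs0, b) l = (bs0 ++ [b], []) := by simp [pvGroupStep, h, hb]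
        have e2 : pvGroupStep ([], b) l = ([b], []) := by simp [pvGroupStep, h, hb]
        rw [e1, e2, ih (bs0 ++ [b]) [], ih [b] []]
        simp
    · have e1 : pvGroupStep (bs0, b) l = (bs0, b ++ [PySem.Str.strip l]) := by
        simp [pvGroupStep, h]
      have e2 : pvGroupStep ([], b) l = ([], b ++ [PySem.Str.strip l]) := by
        simp [pvGroupStep, h]
      rw [e1, e2, ih bs0 (b ++ [PySem.Str.strip l])]

-- main invariant: A's flat loop, started in the middle of a block, computes what B computes
theorem pv_key (lines : List String) :
    ∀ (block : List String) (items : List String), (∀ s ∈ block, pvGood s) →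
    pvFlush (lines.foldl pvStepA (block.foldl pvInnerStep (items, none))).1
            (lines.foldl pvStepA (block.foldl pvInnerStep (items, none))).2
      = (if (lines.foldl pvGroupStep ([], block)).2 ≠ [] then
           (lines.foldl pvGroupStep ([], block)).1 ++ [(lines.foldl pvGroupStep ([], block)).2]
         else (lines.foldl pvGroupStep ([], block)).1).foldl pvBlockStep items := by
  induction lines with
  | nil =>
    intro block items _
    by_cases hb : block = []
    · subst hb; simp [pvFlush]
    · simp [hb, pvBlockStep]
  | cons l rest ih =>
    intro block items hg
    by_cases h : PySem.Str.strip l = ""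
    · have hne : (block.foldl pvInnerStep (items, none)).2 ≠ some "" :=
        pv_inner_snd_ne block _ hg (by simp)
      simp only [List.foldl_cons]
      rw [pv_stepA_blank _ l h hne]
      have hset : ((pvFlush (block.foldl pvInnerStep (items, none)).1
            (block.foldl pvInnerStep (items, none)).2, (none : Option String)))
          = ([] : List String).foldl pvInnerStep (pvBlockStep items block, none) := by
        simp [pvBlockStep]
      rw [hset, ih [] (pvBlockStep items block) (by simp)]
      have hgs : pvGroupStep ([], block) l
          = (if block ≠ [] then ([block], ([] : List String)) else ([], [])) := by
        by_cases hb : block = [] <;> simp [pvGroupStep, h, hb]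
      by_cases hblk : block = []
      · subst hblk
        simp only [hgs, ne_eq, not_true_eq_false, reduceIte]
        simp [pvBlockStep, pvFlush]
      · simp only [hgs, hblk, ne_eq, not_false_eq_true, reduceIte]
        rw [pv_group_prefix rest [block] []]
        by_cases hq : (rest.foldl pvGroupStep ([], ([] : List String))).2 = []
        · simp [hq, pvBlockStep]
        · simp [hq, pvBlockStep, List.foldl_append]
    · simp only [List.foldl_cons]
      rw [pv_stepA_nonblank _ l h]
      have hstep : pvInnerStep (block.foldl pvInnerStep (items, none)) (PySem.Str.strip l)
          = (block ++ [PySem.Str.strip l]).foldl pvInnerStep (items, none) := by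
        simp [List.foldl_append]
      rw [hstep, ih (block ++ [PySem.Str.strip l]) items (by
        intro s hs
        rcases List.mem_append.mp hs with hs | hs
        · exact hg s hs
        · simp only [List.mem_singleton] at hs
          subst hs; exact pv_good_strip l h)]
      have hgs : pvGroupStep ([], block) l = ([], block ++ [PySem.Str.strip l]) := by
        simp [pvGroupStep, h]
      rw [hgs]

-- ===== VERDICT (by name: the statement is the Claim_ definition above) =====
theorem extract_bullet_list_py_spec : Claim_equal_extract_bullet_list_py := by
  intro sc _
  unfold Spec_extract_bullet_list_py extract_bullet_list_py extract_bullet_list_py_alt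
  by_cases h : PySem.Str.strip sc = ""
  · simp [h]
  · simp only [h, reduceIte]
    have := pv_key ((PySem.Str.split? sc "\n").getD []) [] [] (by simp)
    simpa [pvFlush] using this
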